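-- pv_equiv track=rewrite | github.com/BCKGeo/geomatics-command-centre | scripts/triage_flagged.py | host_matches_slug
-- ===== SOURCE A (Python) =====
-- def host_matches_slug(host: str, slug: str) -> bool:
--     h = (host or "").lower()
--     s = slug.lower()
--     if not h or not s:
--         return False
--     labels = h.split(".")
--     if len(labels) < 2 or labels[-1] != "ca":
--         return False
--     # match if any label equals slug, or contains slug as a substring where
--     # only admin prefixes/suffixes differ (cityof, townof, districtof, etc.)
--     for label in labels[:-1]:  # all labels except the TLD
--         if label == s:
--             return True
--         # admin-prefix variants
--         for prefix in ("cityof", "townof", "districtof", "townshipof",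
--                        "municipalityof", "villageof", "countyof", "regionof"):
--             if label == prefix + s:
--                 return True
--         # www or other generic subdomains are handled by iterating labels
--     return False
-- ===== SOURCE B (Python) =====
-- _ADMIN_PREFIXES = ("", "cityof", "townof", "districtof", "townshipof",
--                    "municipalityof", "villageof", "countyof", "regionof")
--
--
-- def host_matches_slug(host: str, slug: str) -> bool:
--     # Substring algorithm: never split the host into labels. A non-TLD label
--     # of h is exactly a dot-free run delimited by dots in "." + h (the final
--     # TLD label has no trailing dot, so it can never match).
--     s = slug.lower()
--     if not host or not s or "." in s:
--         return False
--     h = host.lower()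
--     if not h.endswith(".ca"):
--         return False
--     dotted = "." + h
--     return any("." + p + s + "." in dotted for p in _ADMIN_PREFIXES)
-- ===== Notes on version B (the rewrite author's own statement) =====
-- stated objective: alternative
-- what changed: B never splits the host into labels: it checks the .ca suffix directly and decides the match by searching the dot-delimited string '.'+host for the substring '.'+prefix+slug+'.' for each admin prefix (the trailing dot is what excludes the TLD label), instead of A's per-label scan with an inner candidate-building loop.
import Mathlib
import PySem

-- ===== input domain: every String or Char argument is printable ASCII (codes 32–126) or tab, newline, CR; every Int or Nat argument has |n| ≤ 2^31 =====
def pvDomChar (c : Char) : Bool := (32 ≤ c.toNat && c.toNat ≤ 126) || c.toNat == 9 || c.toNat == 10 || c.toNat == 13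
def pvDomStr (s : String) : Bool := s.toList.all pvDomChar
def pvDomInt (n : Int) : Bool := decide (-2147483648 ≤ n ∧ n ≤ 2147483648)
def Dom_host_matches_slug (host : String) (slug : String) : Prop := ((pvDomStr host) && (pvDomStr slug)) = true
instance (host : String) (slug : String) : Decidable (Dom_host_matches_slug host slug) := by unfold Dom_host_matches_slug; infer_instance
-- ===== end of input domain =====

-- B drops the label split entirely: it checks the ".ca" suffix and searches the dotted
-- host "."+h for delimiter-bounded substrings "."+prefix+slug+"." (alternative algorithm).


-- ===== PORT A =====
-- the tuple of admin prefixes A's inner for-loop iterates over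
def aPrefixes : List (List Char) :=
  ["cityof".toList, "townof".toList, "districtof".toList, "townshipof".toList,
   "municipalityof".toList, "villageof".toList, "countyof".toList, "regionof".toList]

def host_matches_slug (host : String) (slug : String) : Bool :=
  let h := PySem.Chars.lower host.toList
  let s := PySem.Chars.lower slug.toList
  if h.isEmpty || s.isEmpty then false
  else
    let labels := PySem.Chars.splitOn h ['.']
    if decide (labels.length < 2) || !(PySem.List.pyGet? labels (-1) == some ('c' :: 'a' :: [])) then false
    else
      -- for label in labels[:-1]: early return True → List.any
      (PySem.List.slice labels none (some (-1))).any (fun label =>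
        label == s || aPrefixes.any (fun p => label == p ++ s))

-- ===== PORT B =====
-- module-level tuple _ADMIN_PREFIXES ("" first, then the eight admin prefixes)
def bPrefixes : List (List Char) :=
  [[], "cityof".toList, "townof".toList, "districtof".toList, "townshipof".toList,
   "municipalityof".toList, "villageof".toList, "countyof".toList, "regionof".toList]

def host_matches_slug_alt (host : String) (slug : String) : Bool :=
  let s := PySem.Chars.lower slug.toList
  if host.toList.isEmpty || s.isEmpty || PySem.Chars.isIn ['.'] s then false
  else
    let h := PySem.Chars.lower host.toList
    if !(PySem.Chars.endswith h ('.' :: 'c' :: 'a' :: [])) then false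
    else
      let dotted := '.' :: h
      bPrefixes.any (fun p => PySem.Chars.isIn ('.' :: (p ++ s) ++ ['.']) dotted)

-- ===== PRECONDITION & SPEC =====
def Spec_host_matches_slug (host : String) (slug : String) (out : Bool) : Prop := out = host_matches_slug_alt host slug
instance (host : String) (slug : String) (out : Bool) : Decidable (Spec_host_matches_slug host slug out) := by unfold Spec_host_matches_slug; infer_instance

-- ===== CLAIM (what is proved, stated in full; the proofs are below) =====
def Claim_equal_host_matches_slug : Prop := ∀ (host : String) (slug : String), Dom_host_matches_slug host slug → Spec_host_matches_slug host slug (host_matches_slug host slug)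

-- ===== LEMMAS AND PROOFS =====

-- structural model of Python's h.split(".") (single-character separator)
def mySplit : List Char → List (List Char)
  | [] => [[]]
  | c :: t => if c = '.' then [] :: mySplit t else (mySplit t).modifyHead (c :: ·)

theorem mySplit_ne_nil (h : List Char) : mySplit h ≠ [] := by
  induction h with
  | nil => simp [mySplit]
  | cons c t ih =>
    simp only [mySplit]
    split
    · simp
    · cases ht : mySplit t with
      | nil => exact absurd ht ih
      | cons m M => simp [List.modifyHead]

theorem splitOn_go_eq (fuel : Nat) (l cur : List Char) (acc : List (List Char))
    (hf : l.length ≤ fuel) :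
    PySem.Chars.splitOn.go ['.'] fuel l cur acc
      = acc.reverse ++ (mySplit l).modifyHead (cur.reverse ++ ·) := by
  induction fuel generalizing l cur acc with
  | zero =>
    have : l = [] := List.length_eq_zero_iff.mp (Nat.le_zero.mp hf)
    subst this
    simp [PySem.Chars.splitOn.go, mySplit]
  | succ fuel ih =>
    cases l with
    | nil => simp [PySem.Chars.splitOn.go, mySplit]
    | cons c rest =>
      by_cases hc : c = '.'
      · subst hc
        have h1 : PySem.Chars.splitOn.go ['.'] (fuel + 1) ('.' :: rest) cur acc
            = PySem.Chars.splitOn.go ['.'] fuel rest [] (cur.reverse :: acc) := by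
          simp [PySem.Chars.splitOn.go, List.isPrefixOf]
        rw [h1, ih rest [] (cur.reverse :: acc) (by simpa using Nat.le_of_succ_le_succ hf)]
        cases hm : mySplit rest with
        | nil => exact absurd hm (mySplit_ne_nil rest)
        | cons m M => simp [mySplit, hm, List.modifyHead]
      · have h1 : PySem.Chars.splitOn.go ['.'] (fuel + 1) (c :: rest) cur acc
            = PySem.Chars.splitOn.go ['.'] fuel rest (c :: cur) acc := by
          simp only [PySem.Chars.splitOn.go, List.isPrefixOf]
          split
          · rename_i hcon
            simp only [Bool.and_eq_true, beq_iff_eq] at hcon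
            exact absurd hcon.1.symm hc
          · simp
        rw [h1, ih rest (c :: cur) acc (by simpa using Nat.le_of_succ_le_succ hf)]
        cases hm : mySplit rest with
        | nil => exact absurd hm (mySplit_ne_nil rest)
        | cons m M => simp [mySplit, hm, List.modifyHead, hc]

theorem splitOn_eq_mySplit (h : List Char) : PySem.Chars.splitOn h ['.'] = mySplit h := by
  have h0 : PySem.Chars.splitOn h ['.'] = PySem.Chars.splitOn.go ['.'] (h.length + 1) h [] [] := rfl
  rw [h0, splitOn_go_eq _ _ _ _ (by omega)]
  cases hm : mySplit h with
  | nil => exact absurd hm (mySplit_ne_nil h)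
  | cons m M => simp [List.modifyHead]

theorem mySplit_dotfree (h : List Char) : ∀ l ∈ mySplit h, '.' ∉ l := by
  induction h with
  | nil => simp [mySplit]
  | cons c t ih =>
    by_cases hc : c = '.'
    · subst hc
      simp only [mySplit]
      intro l hl
      rcases List.mem_cons.mp hl with rfl | hl
      · simp
      · exact ih l hl
    · simp only [mySplit, if_neg hc]
      cases hm : mySplit t with
      | nil => exact absurd hm (mySplit_ne_nil t)
      | cons m M =>
        intro l hl
        rcases List.mem_cons.mp hl with rfl | hl
        · intro hcon
          rcases List.mem_cons.mp hcon with h1 | h1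
          · exact hc h1.symm
          · exact ih m (hm ▸ List.mem_cons_self) h1
        · exact ih l (hm ▸ List.mem_cons_of_mem m hl)

-- join with '.' separators (inverse of mySplit)
def myJoin : List (List Char) → List Char
  | [] => []
  | [l] => l
  | l :: L => l ++ '.' :: myJoin L

theorem myJoin_cons_cons (l m : List Char) (L : List (List Char)) :
    myJoin (l :: m :: L) = l ++ '.' :: myJoin (m :: L) := rfl

theorem myJoin_mySplit (h : List Char) : myJoin (mySplit h) = h := by
  induction h with
  | nil => rfl
  | cons c t ih =>
    by_cases hc : c = '.'
    · subst hc
      simp only [mySplit]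
      cases hm : mySplit t with
      | nil => exact absurd hm (mySplit_ne_nil t)
      | cons m M =>
        rw [hm] at ih
        simp [myJoin_cons_cons, ← ih]
    · simp only [mySplit, if_neg hc]
      cases hm : mySplit t with
      | nil => exact absurd hm (mySplit_ne_nil t)
      | cons m M =>
        rw [hm] at ih
        cases M with
        | nil => simpa [myJoin, List.modifyHead] using congrArg (c :: ·) ih
        | cons x X =>
          simp only [List.modifyHead, myJoin_cons_cons] at ih ⊢
          simpa using congrArg (c :: ·) ih

-- c++"." is a prefix of l++"."++r, for dot-free c and l, iff c = l
theorem prefix_upto_dot (c : List Char) : ∀ (l r : List Char), '.' ∉ c → '.' ∉ l →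
    (c ++ ['.'] <+: l ++ '.' :: r ↔ c = l) := by
  induction c with
  | nil =>
    intro l r _ hl
    cases l with
    | nil => simp
    | cons x l' =>
      simp only [List.nil_append, List.cons_append, List.cons_prefix_cons]
      constructor
      · rintro ⟨h1, -⟩
        exact absurd (h1 ▸ List.mem_cons_self) hl
      · intro hcon
        exact absurd hcon (by simp)
  | cons a c' ih =>
    intro l r hc hl
    cases l with
    | nil =>
      simp only [List.cons_append, List.nil_append, List.cons_prefix_cons]
      constructor
      · rintro ⟨h1, -⟩
        exact absurd (h1 ▸ List.mem_cons_self) hc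
      · intro hcon
        exact absurd hcon (by simp)
    | cons x l' =>
      simp only [List.cons_append, List.cons_prefix_cons]
      rw [ih l' r (fun hm => hc (List.mem_cons_of_mem a hm))
            (fun hm => hl (List.mem_cons_of_mem x hm))]
      constructor
      · rintro ⟨rfl, rfl⟩; rfl
      · intro hcon
        injection hcon with h1 h2
        exact ⟨h1, h2⟩

-- a pattern starting with '.' occurs in l++"."++r (l dot-free) iff it occurs in "."++r
theorem infix_skip_label (cs : List Char) : ∀ (l r : List Char), '.' ∉ l →
    (('.' :: cs) <:+: l ++ '.' :: r ↔ ('.' :: cs) <:+: '.' :: r) := by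
  intro l
  induction l with
  | nil => intro r _; exact Iff.rfl
  | cons x l' ih =>
    intro r hl
    rw [List.cons_append, List.infix_cons_iff]
    rw [ih r (fun hm => hl (List.mem_cons_of_mem x hm))]
    constructor
    · rintro (hpre | h)
      · rw [List.cons_prefix_cons] at hpre
        exact absurd (hpre.1.symm ▸ List.mem_cons_self) hl
      · exact h
    · exact Or.inr

-- ".ca" is a suffix of l++"."++r (l dot-free) iff it is a suffix of "."++r
theorem suffix_skip_label : ∀ (l r : List Char), '.' ∉ l →
    (('.' :: 'c' :: 'a' :: []) <:+ l ++ '.' :: r ↔ ('.' :: 'c' :: 'a' :: []) <:+ '.' :: r) := by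
  intro l
  induction l with
  | nil => intro r _; exact Iff.rfl
  | cons x l' ih =>
    intro r hl
    rw [List.cons_append, List.suffix_cons_iff]
    rw [ih r (fun hm => hl (List.mem_cons_of_mem x hm))]
    constructor
    · rintro (heq | h)
      · injection heq with h1 h2
        exact absurd (h1.symm ▸ List.mem_cons_self) hl
      · exact h
    · exact Or.inr

-- MAIN: for dot-free c, "."++c++"." occurs in "."++myJoin L iff c is a non-final element of L
theorem infix_iff_mem_dropLast (c : List Char) (hc : '.' ∉ c) :
    ∀ (L : List (List Char)), L ≠ [] → (∀ l ∈ L, '.' ∉ l) →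
    (('.' :: c ++ ['.']) <:+: ('.' :: myJoin L) ↔ c ∈ L.dropLast) := by
  intro L
  induction L with
  | nil => intro h; exact absurd rfl h
  | cons l L' ih =>
    intro _ hdf
    cases L' with
    | nil =>
      simp only [myJoin, show ([l] : List (List Char)).dropLast = [] from rfl,
        List.not_mem_nil, iff_false]
      intro hinf
      have hcount := hinf.sublist.count_le '.'
      have h1 : ('.' :: c ++ ['.']).count '.' = c.count '.' + 2 := by
        simp [List.count_append]
      have h2 : ('.' :: l).count '.' = l.count '.' + 1 := by
        simp
      rw [h1, h2, List.count_eq_zero.mpr hc,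
        List.count_eq_zero.mpr (hdf l List.mem_cons_self)] at hcount
      omega
    | cons l2 L2 =>
      have hdl : '.' ∉ l := hdf l List.mem_cons_self
      have hdf2 : ∀ x ∈ l2 :: L2, '.' ∉ x := fun x hx => hdf x (List.mem_cons_of_mem l hx)
      rw [myJoin_cons_cons]
      rw [List.infix_cons_iff]
      have hpre : ('.' :: c ++ ['.']) <+: '.' :: (l ++ '.' :: myJoin (l2 :: L2)) ↔ c = l := by
        rw [List.cons_append, List.cons_prefix_cons]
        simp only [true_and]
        exact prefix_upto_dot c l _ hc hdl
      have hrest : ('.' :: c ++ ['.']) <:+: l ++ '.' :: myJoin (l2 :: L2) ↔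
          c ∈ (l2 :: L2).dropLast := by
        rw [List.cons_append, infix_skip_label (c ++ ['.']) l _ hdl]
        exact ih (by simp) hdf2
      rw [hpre, hrest, List.dropLast_cons₂, List.mem_cons]

-- the TLD guard: length/last-label test on the split iff ".ca" suffix of the joined string
theorem guard_iff (L : List (List Char)) (hdf : ∀ l ∈ L, '.' ∉ l) :
    (2 ≤ L.length ∧ L.getLast? = some ('c' :: 'a' :: [])) ↔
      ('.' :: 'c' :: 'a' :: []) <:+ myJoin L := by
  induction L with
  | nil => simp [myJoin]
  | cons l L' ih =>
    cases L' with
    | nil =>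
      simp only [myJoin, List.length_singleton]
      constructor
      · rintro ⟨hlen, -⟩; omega
      · intro hsuf
        have : '.' ∈ l := hsuf.sublist.subset (by simp)
        exact absurd this (hdf l List.mem_cons_self)
    | cons l2 L2 =>
      have hdl : '.' ∉ l := hdf l List.mem_cons_self
      have hdf2 : ∀ x ∈ l2 :: L2, '.' ∉ x := fun x hx => hdf x (List.mem_cons_of_mem l hx)
      have ih' := ih hdf2
      rw [myJoin_cons_cons, suffix_skip_label l _ hdl, List.suffix_cons_iff]
      have hlast : (l :: l2 :: L2).getLast? = (l2 :: L2).getLast? :=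
        List.getLast?_cons_cons ..
      rw [hlast]
      cases L2 with
      | nil =>
        simp only [myJoin, List.length_cons, List.getLast?_singleton,
          Option.some.injEq]
        constructor
        · rintro ⟨-, hl2⟩
          left
          rw [hl2]
        · rintro (heq | hsuf)
          · injection heq with h1 h2
            exact ⟨by omega, h2.symm⟩
          · have : '.' ∈ l2 := hsuf.sublist.subset (by simp)
            exact absurd this (hdf2 l2 List.mem_cons_self)
      | cons l3 L3 =>
        have hdotJ : '.' ∈ myJoin (l2 :: l3 :: L3) := by
          rw [myJoin_cons_cons]
          exact List.mem_append_right _ List.mem_cons_self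
        constructor
        · rintro ⟨-, hlastv⟩
          right
          exact ih'.mp ⟨by simp, hlastv⟩
        · rintro (heq | hsuf)
          · injection heq with h1 h2
            rw [← h2] at hdotJ
            simp at hdotJ
          · exact ⟨by simp, (ih'.mpr hsuf).2⟩

theorem pyGet?_neg_one {α : Type} (L : List α) (hL : L ≠ []) :
    PySem.List.pyGet? L (-1) = L.getLast? := by
  have hlen : 1 ≤ L.length := List.length_pos_iff.mpr hL
  have h1 : ¬ ((0:Int) ≤ -1) := by norm_num
  have h2 : -((L.length : Nat) : Int) ≤ -1 := by
    have : (1:Int) ≤ (L.length : Int) := by exact_mod_cast hlen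
    omega
  rw [List.getLast?_eq_getElem?]
  simp only [PySem.List.pyGet?, PySem.List.pyIdx?, if_neg h1, if_pos h2]
  norm_num

theorem slice_dropLast {α : Type} (L : List α) :
    PySem.List.slice L none (some (-1)) = L.dropLast := by
  have h := PySem.List.slice_to_neg_natCast L 1 (by norm_num)
  rw [List.dropLast_eq_take]
  simpa using h

-- [a] occurs in l iff a is an element of l
theorem singleton_infix {α : Type} (a : α) (l : List α) : [a] <:+: l ↔ a ∈ l := by
  constructor
  · intro h
    exact h.subset (List.mem_singleton_self a)
  · intro h
    obtain ⟨s, t, rfl⟩ := List.append_of_mem h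
    exact ⟨s, t, by simp⟩

theorem lower_isEmpty (l : List Char) : (PySem.Chars.lower l).isEmpty = l.isEmpty := by
  simp [PySem.Chars.lower]

theorem aPrefixes_dotfree : ∀ p ∈ aPrefixes, '.' ∉ p := by decide

-- per-candidate bridge: B's substring test decides exactly "candidate is a non-TLD label"
theorem cand_iff (h s p : List Char) (hpdf : '.' ∉ p) (hdot : '.' ∉ s) :
    (PySem.Chars.isIn ('.' :: (p ++ s) ++ ['.']) ('.' :: h) = true ↔
      (p ++ s) ∈ (mySplit h).dropLast) := by
  have hpsdf : '.' ∉ p ++ s := by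
    intro hm
    rcases List.mem_append.mp hm with hm | hm
    · exact hpdf hm
    · exact hdot hm
  rw [PySem.Chars.isIn_iff_infix]
  have hJ : myJoin (mySplit h) = h := myJoin_mySplit h
  calc ('.' :: (p ++ s) ++ ['.']) <:+: ('.' :: h)
      ↔ ('.' :: (p ++ s) ++ ['.']) <:+: ('.' :: myJoin (mySplit h)) := by rw [hJ]
    _ ↔ (p ++ s) ∈ (mySplit h).dropLast :=
        infix_iff_mem_dropLast (p ++ s) hpsdf (mySplit h) (mySplit_ne_nil h) (mySplit_dotfree h)

-- ===== VERDICT (by name: the statement is the Claim_ definition above) =====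
theorem host_matches_slug_spec : Claim_equal_host_matches_slug := by
  intro host slug _
  unfold Spec_host_matches_slug
  simp only [host_matches_slug, host_matches_slug_alt, splitOn_eq_mySplit]
  set s := PySem.Chars.lower slug.toList with hsdef
  set hl := PySem.Chars.lower host.toList with hldef
  set L := mySplit hl with hLdef
  have Hne : L ≠ [] := mySplit_ne_nil hl
  have Hdf : ∀ l ∈ L, '.' ∉ l := mySplit_dotfree hl
  have Hpos : (2 ≤ L.length ∧ L.getLast? = some ('c' :: 'a' :: [])) ↔
      PySem.Chars.endswith hl ('.' :: 'c' :: 'a' :: []) = true := by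
    rw [PySem.Chars.endswith_iff]
    have hg := guard_iff L Hdf
    rwa [show myJoin L = hl from by rw [hLdef]; exact myJoin_mySplit hl] at hg
  split
  · rename_i hc1
    split
    · rfl
    · rename_i hd1
      exfalso
      apply hd1
      rw [Bool.or_eq_true] at hc1
      rcases hc1 with h1 | h1
      · rw [hldef, lower_isEmpty] at h1
        simp [h1]
      · simp [h1]
  · rename_i hc1
    split
    · rename_i hc2
      split
      · rfl
      · rename_i hd1
        split
        · rfl
        · rename_i hd2
          exfalso
          have he : PySem.Chars.endswith hl ('.' :: 'c' :: 'a' :: []) = true := by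
            cases he0 : PySem.Chars.endswith hl ('.' :: 'c' :: 'a' :: []) with
            | false => exact absurd (by rw [he0]; rfl) hd2
            | true => rfl
          have hca := Hpos.mpr he
          rw [Bool.or_eq_true] at hc2
          rcases hc2 with h1 | h1
          · rw [decide_eq_true_eq] at h1
            have := hca.1
            omega
          · rw [Bool.not_eq_true', beq_eq_false_iff_ne] at h1
            exact h1 (by rw [pyGet?_neg_one L Hne]; exact hca.2)
    · rename_i hc2
      have hAnyFalse : '.' ∈ s → ((PySem.List.slice L none (some (-1))).any (fun label =>
          label == s || aPrefixes.any (fun p => label == p ++ s))) = false := by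
        intro hdot
        rw [List.any_eq_false]
        intro label hlabel
        have hmem : label ∈ L := by
          rw [slice_dropLast] at hlabel
          exact List.dropLast_subset L hlabel
        have hldf := Hdf label hmem
        intro hcontra
        rw [Bool.or_eq_true] at hcontra
        rcases hcontra with h1 | h1
        · rw [beq_iff_eq] at h1
          exact hldf (h1 ▸ hdot)
        · rcases List.any_eq_true.mp h1 with ⟨p, hp, hlp⟩
          rw [beq_iff_eq] at hlp
          exact hldf (hlp ▸ List.mem_append_right p hdot)
      split
      · rename_i hd1
        have hdot : '.' ∈ s := by
          rw [Bool.or_eq_true] at hd1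
          rcases hd1 with h1 | h1
          · exfalso
            apply hc1
            rw [Bool.or_eq_true] at h1
            rcases h1 with h2 | h2
            · rw [← lower_isEmpty, ← hldef] at h2
              simp [h2]
            · simp [h2]
          · rw [PySem.Chars.isIn_iff_infix, singleton_infix] at h1
            exact h1
        rw [hAnyFalse hdot]
      · rename_i hd1
        have hdot : '.' ∉ s := by
          intro hdot
          apply hd1
          have hi : PySem.Chars.isIn ['.'] s = true := by
            rw [PySem.Chars.isIn_iff_infix, singleton_infix]
            exact hdot
          rw [hi]
          simp
        split
        · rename_i hd2
          exfalso
          rw [Bool.not_eq_true'] at hd2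
          have hguard : (decide (L.length < 2) ||
              !(PySem.List.pyGet? L (-1) == some ('c' :: 'a' :: []))) = false := by
            cases hg0 : (decide (L.length < 2) ||
                !(PySem.List.pyGet? L (-1) == some ('c' :: 'a' :: []))) with
            | false => rfl
            | true => exact absurd hg0 hc2
          rw [Bool.or_eq_false_iff] at hguard
          obtain ⟨hg1, hg2⟩ := hguard
          rw [decide_eq_false_iff_not] at hg1
          rw [Bool.not_eq_false', beq_iff_eq, pyGet?_neg_one L Hne] at hg2
          have := Hpos.mp ⟨by omega, hg2⟩
          rw [this] at hd2
          simp at hd2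
        · rename_i hd2
          rw [slice_dropLast, Bool.eq_iff_iff]
          simp only [List.any_eq_true, Bool.or_eq_true, beq_iff_eq]
          have hb : bPrefixes = [] :: aPrefixes := rfl
          rw [hLdef]
          constructor
          · rintro ⟨label, hlb, rfl | ⟨p, hp, rfl⟩⟩
            · refine ⟨[], by rw [hb]; exact List.mem_cons_self, ?_⟩
              exact (cand_iff hl s [] (by simp) hdot).mpr (by simpa using hlb)
            · refine ⟨p, by rw [hb]; exact List.mem_cons_of_mem _ hp, ?_⟩
              exact (cand_iff hl s p (aPrefixes_dotfree p hp) hdot).mpr hlb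
          · rintro ⟨p, hp, hin⟩
            rw [hb, List.mem_cons] at hp
            rcases hp with rfl | hp
            · have hmem := (cand_iff hl s [] (by simp) hdot).mp hin
              exact ⟨s, by simpa using hmem, Or.inl rfl⟩
            · have hmem := (cand_iff hl s p (aPrefixes_dotfree p hp) hdot).mp hin
              exact ⟨p ++ s, hmem, Or.inr ⟨p, hp, rfl⟩⟩
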